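-- pv_equiv track=rewrite | github.com/astral451/AdventOfCode | 2022/day8/elf_tree_house.py | check_vertical_values
-- ===== SOURCE A (Python) =====
-- def check_vertical_values(tree_data, h_range, w_range, h_idx, w_idx):
--     """
--     Moves through the vertical access from the grid position.  This will be expensive
--     in large grids as it does not early out once a block is found. It could be
--     better.
--     """
--
--     tree_height = tree_data[h_idx][w_idx]
--     neg_vis = True
--     pos_vis = True
--     visiblilty = []
--     for h in h_range:
--         if h == h_idx:
--             visiblilty.append(-1) # this is THE tree
--         else:
--             if tree_data[h][w_idx] >= tree_height:
--                 visiblilty.append(0)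
--                 if h <= h_idx:
--                     neg_vis = False
--                 else:
--                     pos_vis = False
--             else:
--                 visiblilty.append(1)
--
--     return visiblilty, neg_vis, pos_vis
-- ===== SOURCE B (Python) =====
-- def check_vertical_values(tree_data, h_range, w_range, h_idx, w_idx):
--     tree_height = tree_data[h_idx][w_idx]
--     visiblilty = [-1 if h == h_idx
--                   else (0 if tree_data[h][w_idx] >= tree_height else 1)
--                   for h in h_range]
--     neg_vis = not any(tree_data[h][w_idx] >= tree_height
--                       for h in h_range if h < h_idx)
--     pos_vis = not any(tree_data[h][w_idx] >= tree_height
--                       for h in h_range if h > h_idx)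
--     return visiblilty, neg_vis, pos_vis
-- ===== Notes on version B (the rewrite author's own statement) =====
-- stated objective: simpler
-- what changed: Replaces A's single flag-carrying accumulator loop by one list comprehension building the visibility list plus two independent any() scans computing the two directional flags.
import Mathlib
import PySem

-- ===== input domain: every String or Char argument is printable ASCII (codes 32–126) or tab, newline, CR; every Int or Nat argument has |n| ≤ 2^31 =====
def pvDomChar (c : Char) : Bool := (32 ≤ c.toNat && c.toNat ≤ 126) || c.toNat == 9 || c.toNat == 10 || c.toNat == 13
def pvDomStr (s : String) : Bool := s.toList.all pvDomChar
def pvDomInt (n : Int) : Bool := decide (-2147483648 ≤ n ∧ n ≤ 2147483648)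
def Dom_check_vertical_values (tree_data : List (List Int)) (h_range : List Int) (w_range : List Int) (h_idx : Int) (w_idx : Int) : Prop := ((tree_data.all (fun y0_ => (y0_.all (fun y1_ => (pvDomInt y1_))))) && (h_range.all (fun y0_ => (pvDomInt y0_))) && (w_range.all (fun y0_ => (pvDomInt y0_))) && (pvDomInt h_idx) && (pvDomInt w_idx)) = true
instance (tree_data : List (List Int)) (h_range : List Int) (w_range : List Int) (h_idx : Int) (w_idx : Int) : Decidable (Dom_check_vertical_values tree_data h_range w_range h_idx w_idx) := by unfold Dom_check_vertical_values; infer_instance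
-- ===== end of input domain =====

-- B replaces A's single flag-carrying loop with one list build plus two independent
-- any-scans for the flags (objective: simpler decomposition, same cost).

-- tree_data[h][w] with Python's negative-index rule; none = IndexError (exact)
def pvCell (td : List (List Int)) (h w : Int) : Option Int :=
  (PySem.List.pyGet? td h).bind (fun r => PySem.List.pyGet? r w)

-- ===== PORT A =====
def check_vertical_values (tree_data : List (List Int)) (h_range : List Int) (w_range : List Int) (h_idx : Int) (w_idx : Int) : List Int × Bool × Bool :=
  let tree_height := (pvCell tree_data h_idx w_idx).getD 0  -- Pre_ guarantees some
  h_range.foldl (fun (s : List Int × Bool × Bool) h =>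
    if h = h_idx then
      (s.1 ++ [-1], s.2.1, s.2.2)
    else
      if (pvCell tree_data h w_idx).getD 0 ≥ tree_height then
        if h ≤ h_idx then (s.1 ++ [0], false, s.2.2)
        else (s.1 ++ [0], s.2.1, false)
      else (s.1 ++ [1], s.2.1, s.2.2)) ([], true, true)

-- ===== PORT B =====
def check_vertical_values_alt (tree_data : List (List Int)) (h_range : List Int) (w_range : List Int) (h_idx : Int) (w_idx : Int) : List Int × Bool × Bool :=
  let tree_height := (pvCell tree_data h_idx w_idx).getD 0  -- Pre_ guarantees some
  let visiblilty := h_range.map (fun h =>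
    if h = h_idx then -1
    else if (pvCell tree_data h w_idx).getD 0 ≥ tree_height then 0 else 1)
  let neg_vis := !(h_range.any (fun h =>
    decide (h < h_idx) && decide ((pvCell tree_data h w_idx).getD 0 ≥ tree_height)))
  let pos_vis := !(h_range.any (fun h =>
    decide (h_idx < h) && decide ((pvCell tree_data h w_idx).getD 0 ≥ tree_height)))
  (visiblilty, neg_vis, pos_vis)

-- ===== PRECONDITION & SPEC =====
-- A raises IndexError iff tree_data[h_idx][w_idx] is out of range, or some
-- h ∈ h_range with h ≠ h_idx has tree_data[h][w_idx] out of range; Pre_ excludes exactly those.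
def Pre_check_vertical_values (tree_data : List (List Int)) (h_range : List Int) (w_range : List Int) (h_idx : Int) (w_idx : Int) : Prop :=
  (pvCell tree_data h_idx w_idx).isSome = true ∧
  ∀ h ∈ h_range, h ≠ h_idx → (pvCell tree_data h w_idx).isSome = true
instance (tree_data : List (List Int)) (h_range : List Int) (w_range : List Int) (h_idx : Int) (w_idx : Int) : Decidable (Pre_check_vertical_values tree_data h_range w_range h_idx w_idx) := by unfold Pre_check_vertical_values; infer_instance
def pvWitness_check_vertical_values : List (List Int) × List Int × List Int × Int × Int :=
  ([[3, 1], [2, 5]], [0, 1], [0, 1], 0, 1)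

def Spec_check_vertical_values (tree_data : List (List Int)) (h_range : List Int) (w_range : List Int) (h_idx : Int) (w_idx : Int) (out : List Int × Bool × Bool) : Prop := out = check_vertical_values_alt tree_data h_range w_range h_idx w_idx
instance (tree_data : List (List Int)) (h_range : List Int) (w_range : List Int) (h_idx : Int) (w_idx : Int) (out : List Int × Bool × Bool) : Decidable (Spec_check_vertical_values tree_data h_range w_range h_idx w_idx out) := by unfold Spec_check_vertical_values; infer_instance

-- ===== CLAIM (what is proved, stated in full; the proofs are below) =====
def Claim_equal_check_vertical_values : Prop := ∀ (tree_data : List (List Int)) (h_range : List Int) (w_range : List Int) (h_idx : Int) (w_idx : Int), Dom_check_vertical_values tree_data h_range w_range h_idx w_idx → Pre_check_vertical_values tree_data h_range w_range h_idx w_idx → Spec_check_vertical_values tree_data h_range w_range h_idx w_idx (check_vertical_values tree_data h_range w_range h_idx w_idx)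

-- ===== LEMMAS AND PROOFS =====

-- Loop invariant: A's fold from state (acc, n, p) appends B's per-element values to acc
-- and conjoins the flags with the negations of B's two any-scans.
theorem cvv_fold (td : List (List Int)) (h_idx w_idx th : Int) :
    ∀ (hr : List Int) (acc : List Int) (n p : Bool),
    hr.foldl (fun (s : List Int × Bool × Bool) h =>
      if h = h_idx then
        (s.1 ++ [-1], s.2.1, s.2.2)
      else
        if (pvCell td h w_idx).getD 0 ≥ th then
          if h ≤ h_idx then (s.1 ++ [0], false, s.2.2)
          else (s.1 ++ [0], s.2.1, false)
        else (s.1 ++ [1], s.2.1, s.2.2)) (acc, n, p)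
    = (acc ++ hr.map (fun h =>
          if h = h_idx then -1
          else if (pvCell td h w_idx).getD 0 ≥ th then 0 else 1),
       n && !(hr.any (fun h => decide (h < h_idx) && decide ((pvCell td h w_idx).getD 0 ≥ th))),
       p && !(hr.any (fun h => decide (h_idx < h) && decide ((pvCell td h w_idx).getD 0 ≥ th)))) := by
  intro hr
  induction hr with
  | nil => intro acc n p; simp
  | cons h t ih =>
    intro acc n p
    by_cases he : h = h_idx
    · simp [he, ih]
    · by_cases hc : (pvCell td h w_idx).getD 0 ≥ th
      · by_cases hle : h ≤ h_idx
        · have h1 : h < h_idx := lt_of_le_of_ne hle he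
          simp [he, hc, hle, ih, h1, not_lt.mpr hle]
        · have h1 : h_idx < h := not_le.mp hle
          simp [he, hc, hle, ih, h1, not_lt.mpr (le_of_lt h1)]
      · have h2 : ¬ ((pvCell td h w_idx).getD 0 ≥ th) := hc
        simp [he, hc, ih]

-- ===== VERDICT (by name: the statement is the Claim_ definition above) =====
theorem check_vertical_values_spec : Claim_equal_check_vertical_values := by
  intro td hr wr hi wi _ _
  unfold Spec_check_vertical_values check_vertical_values check_vertical_values_alt
  simp [cvv_fold]
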